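-- pv_equiv track=rewrite | github.com/shrutishharmacareer/nl-to-sql-pipeline | src/llm_handler.py | is_safe_sql
-- ===== SOURCE A (Python) =====
-- def is_safe_sql(sql: str) -> bool:
--     """
--     Checks SQL for dangerous keywords.
--     Returns False if unsafe.
--     """
--     dangerous_keywords = [
--         "INSERT", "UPDATE", "DELETE", "DROP",
--         "ALTER", "TRUNCATE", "CREATE", "REPLACE",
--         "EXEC", "EXECUTE", "GRANT", "REVOKE"
--     ]
--     sql_upper = sql.upper()
--     for keyword in dangerous_keywords:
--         if keyword in sql_upper:
--             return False
--     return True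
-- ===== SOURCE B (Python) =====
-- import re
--
-- _DANGEROUS_RE = re.compile(
--     "INSERT|UPDATE|DELETE|DROP|ALTER|TRUNCATE|CREATE|REPLACE|"
--     "EXEC|EXECUTE|GRANT|REVOKE"
-- )
--
-- def is_safe_sql(sql: str) -> bool:
--     """
--     Checks SQL for dangerous keywords.
--     Returns False if unsafe.
--     """
--     return _DANGEROUS_RE.search(sql.upper()) is None
-- ===== Notes on version B (the rewrite author's own statement) =====
-- stated objective: idiomatic
-- what changed: Replaces A's twelve separate substring scans of the uppercased SQL with one precompiled regex alternation searched in a single left-to-right pass.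
import Mathlib
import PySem

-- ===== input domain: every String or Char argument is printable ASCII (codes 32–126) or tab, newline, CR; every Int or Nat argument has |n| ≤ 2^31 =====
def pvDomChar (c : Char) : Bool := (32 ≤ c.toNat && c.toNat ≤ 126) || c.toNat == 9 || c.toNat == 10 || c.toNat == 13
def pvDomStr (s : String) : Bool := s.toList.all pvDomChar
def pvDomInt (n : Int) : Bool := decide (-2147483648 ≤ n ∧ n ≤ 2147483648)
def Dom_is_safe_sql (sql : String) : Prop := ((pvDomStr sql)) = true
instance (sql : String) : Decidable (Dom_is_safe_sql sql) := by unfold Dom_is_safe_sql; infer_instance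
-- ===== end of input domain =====

-- B replaces A's twelve separate substring scans with one combined alternation searched in a single left-to-right pass (idiomatic; return value only).

-- ===== PORT A =====
-- A's keyword list, in order.
def pvKeywords : List String :=
  ["INSERT", "UPDATE", "DELETE", "DROP",
   "ALTER", "TRUNCATE", "CREATE", "REPLACE",
   "EXEC", "EXECUTE", "GRANT", "REVOKE"]

-- A's for-loop: return False at the first keyword contained in sql_upper.
def pvCheckLoop : List String → String → Bool
  | [], _ => true
  | k :: ks, s => if PySem.Str.isIn k s then false else pvCheckLoop ks s

def is_safe_sql (sql : String) : Bool :=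
  pvCheckLoop pvKeywords (PySem.Str.upper sql)

-- ===== PORT B =====
-- B's compiled alternation pattern, as its list of literal alternatives.
def pvAlts : List (List Char) :=
  ["INSERT".toList, "UPDATE".toList, "DELETE".toList, "DROP".toList,
   "ALTER".toList, "TRUNCATE".toList, "CREATE".toList, "REPLACE".toList,
   "EXEC".toList, "EXECUTE".toList, "GRANT".toList, "REVOKE".toList]

-- re.search of a literal alternation: at each position (left to right) try the
-- alternatives; matched iff some alternative is a prefix of some suffix.
def pvReSearch (alts : List (List Char)) : List Char → Bool
  | [] => alts.any (fun p => p.isPrefixOf ([] : List Char))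
  | c :: t => alts.any (fun p => p.isPrefixOf (c :: t)) || pvReSearch alts t

def is_safe_sql_alt (sql : String) : Bool :=
  !(pvReSearch pvAlts (PySem.Str.upper sql).toList)

-- ===== PRECONDITION & SPEC =====
def Spec_is_safe_sql (sql : String) (out : Bool) : Prop := out = is_safe_sql_alt sql
instance (sql : String) (out : Bool) : Decidable (Spec_is_safe_sql sql out) := by unfold Spec_is_safe_sql; infer_instance

-- ===== CLAIM (what is proved, stated in full; the proofs are below) =====
def Claim_equal_is_safe_sql : Prop := ∀ (sql : String), Dom_is_safe_sql sql → Spec_is_safe_sql sql (is_safe_sql sql)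

-- ===== LEMMAS AND PROOFS =====

-- The scan matches iff some alternative is a prefix of some suffix.
lemma pvReSearch_iff (alts : List (List Char)) (s : List Char) :
    pvReSearch alts s = true ↔ ∃ p ∈ alts, ∃ j, p <+: s.drop j := by
  induction s with
  | nil =>
      simp [pvReSearch, List.any_eq_true, List.isPrefixOf_iff_prefix]
  | cons c t ih =>
      simp only [pvReSearch, Bool.or_eq_true, List.any_eq_true,
        List.isPrefixOf_iff_prefix, ih]
      constructor
      · rintro (⟨p, hp, hpre⟩ | ⟨p, hp, j, hpre⟩)
        · exact ⟨p, hp, 0, by simpa using hpre⟩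
        · exact ⟨p, hp, j + 1, by simpa using hpre⟩
      · rintro ⟨p, hp, j, hpre⟩
        cases j with
        | zero => exact Or.inl ⟨p, hp, by simpa using hpre⟩
        | succ j => exact Or.inr ⟨p, hp, j, by simpa using hpre⟩

-- A's loop returns true iff no keyword occurs.
lemma pvCheckLoop_eq (ks : List String) (s : String) :
    pvCheckLoop ks s = !(ks.any (fun k => PySem.Str.isIn k s)) := by
  induction ks with
  | nil => simp [pvCheckLoop]
  | cons k ks ih =>
      rw [pvCheckLoop]
      cases h : PySem.Str.isIn k s with
      | true => rw [List.any_cons, h]; simp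
      | false => rw [List.any_cons, h, ih]; simp

lemma pvAlts_eq : pvAlts = pvKeywords.map String.toList := by decide

lemma pvSearch_eq_any (s : String) :
    pvReSearch pvAlts s.toList = pvKeywords.any (fun k => PySem.Str.isIn k s) := by
  rw [Bool.eq_iff_iff, pvReSearch_iff, List.any_eq_true, pvAlts_eq]
  constructor
  · rintro ⟨p, hp, j, hpre⟩
    rcases List.mem_map.mp hp with ⟨k, hk, rfl⟩
    refine ⟨k, hk, ?_⟩
    rw [PySem.Str.isIn_eq]
    exact (PySem.Chars.exists_prefix_drop_iff_isIn k.toList s.toList).mp ⟨j, hpre⟩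
  · rintro ⟨k, hk, hin⟩
    rw [PySem.Str.isIn_eq] at hin
    rcases (PySem.Chars.exists_prefix_drop_iff_isIn k.toList s.toList).mpr hin with ⟨j, hpre⟩
    exact ⟨k.toList, List.mem_map.mpr ⟨k, hk, rfl⟩, j, hpre⟩

-- ===== VERDICT (by name: the statement is the Claim_ definition above) =====
theorem is_safe_sql_spec : Claim_equal_is_safe_sql := by
  intro sql _
  show is_safe_sql sql = is_safe_sql_alt sql
  rw [is_safe_sql, is_safe_sql_alt, pvCheckLoop_eq, pvSearch_eq_any]
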